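-- pv_equiv track=rewrite | github.com/JCReed26/python4521-assignments | assignment3_provided/seq_assignment3_a2.py | split_bounds
-- ===== SOURCE A (Python) =====
-- def split_bounds(nrows, nprocs):
--     # Even-ish partition of rows into contiguous blocks
--     size = (nrows + nprocs - 1) // nprocs
--     bounds = []
--     for i in range(nprocs):
--         s = i * size
--         e = min(nrows, s + size)
--         if s < e:
--             bounds.append((s, e))
--
--     return bounds
-- ===== SOURCE B (Python) =====
-- def split_bounds(nrows, nprocs):
--     # Closed form: compute the number of nonempty blocks arithmetically,
--     # emit the full-size blocks, then one truncated tail block ending at nrows.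
--     if nrows <= 0 or nprocs <= 0:
--         return []
--     size = -(-nrows // nprocs)      # ceiling division
--     k = -(-nrows // size)           # number of nonempty blocks
--     full = [(i * size, (i + 1) * size) for i in range(k - 1)]
--     return full + [((k - 1) * size, nrows)]
-- ===== Notes on version B (the rewrite author's own statement) =====
-- stated objective: alternative
-- what changed: Instead of iterating over all nprocs candidate blocks and filtering out empty ones with a per-iteration min-clamp, B computes the number of nonempty blocks k in closed form via two ceiling divisions and directly emits k-1 full-size blocks plus one truncated tail block ending at nrows.
import Mathlib
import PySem

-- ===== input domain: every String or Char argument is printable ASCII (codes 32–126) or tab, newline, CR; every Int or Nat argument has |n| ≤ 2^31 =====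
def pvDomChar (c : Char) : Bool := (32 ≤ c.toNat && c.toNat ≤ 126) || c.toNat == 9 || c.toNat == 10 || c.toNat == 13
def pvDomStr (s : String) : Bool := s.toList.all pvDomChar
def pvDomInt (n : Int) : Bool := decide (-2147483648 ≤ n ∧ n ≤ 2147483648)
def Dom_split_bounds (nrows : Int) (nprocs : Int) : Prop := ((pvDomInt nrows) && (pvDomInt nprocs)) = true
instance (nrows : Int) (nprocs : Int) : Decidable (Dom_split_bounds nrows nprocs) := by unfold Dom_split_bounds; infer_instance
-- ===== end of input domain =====

-- B computes the number of nonempty blocks in closed form and emits full blocks plus one truncated tail, instead of generating nprocs candidates and filtering (alternative algorithm, same cost).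


-- ===== PORT A =====
def split_bounds (nrows : Int) (nprocs : Int) : List (Int × Int) :=
  let size := PySem.Int.floordiv (nrows + nprocs - 1) nprocs
  (PySem.List.pyRange 0 nprocs 1).foldl (fun bounds i =>
    let s := i * size
    let e := min nrows (s + size)
    if s < e then bounds ++ [(s, e)] else bounds) []

-- ===== PORT B =====
def split_bounds_alt (nrows : Int) (nprocs : Int) : List (Int × Int) :=
  if nrows ≤ 0 ∨ nprocs ≤ 0 then []
  else
    let size := -(PySem.Int.floordiv (-nrows) nprocs)
    let k := -(PySem.Int.floordiv (-nrows) size)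
    let full := (PySem.List.pyRange 0 (k - 1) 1).map (fun i => (i * size, (i + 1) * size))
    full ++ [((k - 1) * size, nrows)]

-- ===== PRECONDITION & SPEC =====
-- Pre_ excludes exactly nprocs = 0, on which the Python A raises ZeroDivisionError at '// nprocs'.
def Pre_split_bounds (nrows : Int) (nprocs : Int) : Prop := nprocs ≠ 0
instance (nrows : Int) (nprocs : Int) : Decidable (Pre_split_bounds nrows nprocs) := by unfold Pre_split_bounds; infer_instance
def pvWitness_split_bounds : Int × Int := (10, 3)

def Spec_split_bounds (nrows : Int) (nprocs : Int) (out : List (Int × Int)) : Prop := out = split_bounds_alt nrows nprocs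
instance (nrows : Int) (nprocs : Int) (out : List (Int × Int)) : Decidable (Spec_split_bounds nrows nprocs out) := by unfold Spec_split_bounds; infer_instance

-- ===== CLAIM (what is proved, stated in full; the proofs are below) =====
def Claim_equal_split_bounds : Prop := ∀ (nrows : Int) (nprocs : Int), Dom_split_bounds nrows nprocs → Pre_split_bounds nrows nprocs → Spec_split_bounds nrows nprocs (split_bounds nrows nprocs)

-- ===== LEMMAS AND PROOFS =====

lemma split_bounds_eq_alt (nrows nprocs : Int) (hpre : nprocs ≠ 0) :
    split_bounds nrows nprocs = split_bounds_alt nrows nprocs := by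
  unfold split_bounds split_bounds_alt
  dsimp only
  set sizeA := PySem.Int.floordiv (nrows + nprocs - 1) nprocs with hsA
  have hfold := PySem.List.foldl_append_if
      (fun i : Int => decide (i * sizeA < min nrows (i * sizeA + sizeA)))
      (fun i : Int => (i * sizeA, min nrows (i * sizeA + sizeA)))
      (PySem.List.pyRange 0 nprocs 1) []
  simp only [decide_eq_true_eq] at hfold
  rw [hfold]
  simp only [List.nil_append]
  by_cases hneg : nprocs < 0
  · rw [PySem.List.pyRange_one_eq_nil (by omega)]
    simp [le_of_lt hneg]
  have hp : 0 < nprocs := by omega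
  -- brackets for sizeA = ceil((nrows + nprocs - 1 + 1 - nprocs) / nprocs)  i.e. floor
  have hA := (PySem.Int.floordiv_eq_iff_of_pos hp (a := nrows + nprocs - 1) (q := sizeA)).mp rfl
  have hA1 : sizeA * nprocs ≤ nrows + nprocs - 1 := hA.1
  have hA2 : nrows + nprocs - 1 < (sizeA + 1) * nprocs := hA.2
  have hA2' : nrows + nprocs - 1 < sizeA * nprocs + nprocs := by nlinarith [hA2]
  by_cases hz : nrows ≤ 0
  · -- A: size ≤ 0, so the filter keeps nothing; B: guard fires
    have hs0 : sizeA ≤ 0 := by nlinarith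
    rw [List.filter_eq_nil_iff.mpr ?_, if_pos (Or.inl hz)]
    · simp
    · intro i _
      simp only [decide_eq_true_eq, not_lt]
      omega
  -- main case: nrows > 0, nprocs > 0
  have hr : 0 < nrows := by omega
  rw [if_neg (by omega)]
  set sizeB := -(PySem.Int.floordiv (-nrows) nprocs) with hsB
  have hB := (PySem.Int.neg_floordiv_neg_eq_iff_of_pos hp (a := nrows) (q := sizeB)).mp rfl
  have hBA : sizeA = sizeB := by
    have h1 : (sizeB - 1) * nprocs = sizeB * nprocs - nprocs := by ring
    have h2 : (sizeA - 1) * nprocs = sizeA * nprocs - nprocs := by ring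
    have hb1 := hB.1; have hb2 := hB.2
    rw [h1] at hb1
    -- sizeA*nprocs - nprocs < nrows ≤ sizeA*nprocs  and same brackets for sizeB ⇒ equal
    have hA1' : sizeA * nprocs - nprocs < nrows := by omega
    have hA2'' : nrows ≤ sizeA * nprocs := by omega
    by_contra hne
    rcases lt_or_gt_of_ne hne with h | h
    · have : sizeA + 1 ≤ sizeB := by omega
      nlinarith
    · have : sizeB + 1 ≤ sizeA := by omega
      nlinarith
  rw [← hBA] at hB ⊢
  have hspos : 0 < sizeA := by nlinarith [hB.2]
  set k := -(PySem.Int.floordiv (-nrows) sizeA) with hk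
  have hK := (PySem.Int.neg_floordiv_neg_eq_iff_of_pos hspos (a := nrows) (q := k)).mp rfl
  have hK1 : (k - 1) * sizeA < nrows := hK.1
  have hK2 : nrows ≤ k * sizeA := hK.2
  have hk1 : 1 ≤ k := by nlinarith
  have hkp : k ≤ nprocs := by nlinarith [hB.2]
  -- the filter keeps exactly the indices 0 ≤ i < k
  have hsplit := PySem.List.pyRange_one_append 0 k nprocs (by omega) hkp
  rw [hsplit, List.filter_append]
  have hkeep : (PySem.List.pyRange 0 k 1).filter
      (fun i => decide (i * sizeA < min nrows (i * sizeA + sizeA))) = PySem.List.pyRange 0 k 1 := by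
    apply List.filter_eq_self.mpr
    intro i hi
    rw [PySem.List.mem_pyRange_one] at hi
    simp only [decide_eq_true_eq]
    have : i * sizeA ≤ (k - 1) * sizeA := by nlinarith [hi.2]
    omega
  have hdrop : (PySem.List.pyRange k nprocs 1).filter
      (fun i => decide (i * sizeA < min nrows (i * sizeA + sizeA))) = [] := by
    apply List.filter_eq_nil_iff.mpr
    intro i hi
    rw [PySem.List.mem_pyRange_one] at hi
    simp only [decide_eq_true_eq, not_lt]
    have : k * sizeA ≤ i * sizeA := by nlinarith [hi.1]
    omega
  rw [hkeep, hdrop, List.append_nil]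
  -- split off the last index k-1 and rewrite both sides
  have : PySem.List.pyRange 0 k 1 = PySem.List.pyRange 0 (k - 1) 1 ++ [k - 1] := by
    have h := PySem.List.pyRange_one_succ_right (a := 0) (b := k - 1) (by omega)
    simpa using h
  rw [this, List.map_append, List.map_cons, List.map_nil]
  congr 1
  · apply List.map_congr_left
    intro i hi
    rw [PySem.List.mem_pyRange_one] at hi
    have h1 : (i + 1) * sizeA ≤ (k - 1) * sizeA := by nlinarith [hi.2]
    have h2 : min nrows (i * sizeA + sizeA) = (i + 1) * sizeA := by
      have : (i + 1) * sizeA = i * sizeA + sizeA := by ring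
      omega
    rw [h2]
  · have h3 : min nrows ((k - 1) * sizeA + sizeA) = nrows := by
      have : (k - 1) * sizeA + sizeA = k * sizeA := by ring
      omega
    rw [h3]

-- ===== VERDICT (by name: the statement is the Claim_ definition above) =====
theorem split_bounds_spec : Claim_equal_split_bounds := by
  intro nrows nprocs _ hpre
  exact split_bounds_eq_alt nrows nprocs hpre
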